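-- pv_equiv track=rewrite | github.com/Rohit8y/Advent-Of-Code-25 | puzzle_6/main.py | parse_problems
-- ===== SOURCE A (Python) =====
-- def parse_problems(columns):
--     problems = []
--     current_problem = []
--
--     for col in columns:
--         # If the column is entirely spaces, it separates problems
--         if col.strip() == "":
--             if current_problem:
--                 problems.append(current_problem)
--                 current_problem = []
--         else:
--             current_problem.append(col)
--
--     if current_problem:
--         problems.append(current_problem)
--
--     # Cephalopod math: problems are read right-to-left
--     problems = problems[::-1]
--     return problems
-- ===== SOURCE B (Python) =====
-- def parse_problems(columns):
--     # Extract maximal runs of non-blank columns with a two-pointer scan,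
--     # prepending each run so the result comes out right-to-left directly
--     # (no accumulator flushing, no final reverse).
--     problems = []
--     i, n = 0, len(columns)
--     while i < n:
--         if columns[i].strip() == "":
--             i += 1
--         else:
--             j = i + 1
--             while j < n and columns[j].strip() != "":
--                 j += 1
--             problems = [columns[i:j]] + problems
--             i = j
--     return problems
-- ===== Notes on version B (the rewrite author's own statement) =====
-- stated objective: alternative
-- what changed: Replaces A's flush-on-blank accumulator plus final list reversal with a two-pointer scan that extracts each maximal non-blank run by an inner scan and prepends it, so the reversed order is built directly and no current_problem/flush logic exists.
import Mathlib
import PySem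

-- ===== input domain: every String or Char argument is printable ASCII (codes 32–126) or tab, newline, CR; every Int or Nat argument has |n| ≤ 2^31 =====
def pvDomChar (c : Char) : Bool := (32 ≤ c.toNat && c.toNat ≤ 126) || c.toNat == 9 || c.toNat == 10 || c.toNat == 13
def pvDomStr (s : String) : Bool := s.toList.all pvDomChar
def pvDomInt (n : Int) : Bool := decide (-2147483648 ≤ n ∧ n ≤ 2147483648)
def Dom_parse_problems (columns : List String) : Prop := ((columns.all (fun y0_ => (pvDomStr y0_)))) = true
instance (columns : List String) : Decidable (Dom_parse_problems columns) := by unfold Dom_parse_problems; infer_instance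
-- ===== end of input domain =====

-- B replaces A's flush-on-blank accumulator + final reverse by a run-extraction scan that
-- prepends each maximal non-blank run (objective: alternative decomposition, same cost).
-- Both programs are pure (A mutates only its own locals); equivalence is about the return value.

-- col.strip() == ""  (shared, both Pythons write this test verbatim)
def pvBlank (s : String) : Bool := PySem.Str.strip s == ""

-- ===== PORT A =====
def pvStepA (st : List (List String) × List String) (col : String) :
    List (List String) × List String :=
  if pvBlank col then
    (if st.2 ≠ [] then (st.1 ++ [st.2], ([] : List String)) else st)
  else (st.1, st.2 ++ [col])

def parse_problems (columns : List String) : List (List String) :=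
  let st := columns.foldl pvStepA ([], [])
  let problems := if st.2 ≠ [] then st.1 ++ [st.2] else st.1
  -- problems[::-1] is exactly List.reverse (PySem.List.slice?_none_none_neg_one)
  problems.reverse

-- ===== PORT B =====
-- outer while-loop of Source B: skip a blank column, or extract the maximal non-blank run
-- (the inner j-scan = takeWhile/dropWhile) and prepend it to `problems`
def pvAltGo : List String → List (List String) → List (List String)
  | [], problems => problems
  | c :: cs, problems =>
    if pvBlank c then pvAltGo cs problems
    else pvAltGo (cs.dropWhile (fun x => !pvBlank x))
           ((c :: cs.takeWhile (fun x => !pvBlank x)) :: problems)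
termination_by cols _ => cols.length
decreasing_by
  all_goals (have := List.length_dropWhile_le (fun x => !pvBlank x) cs; simp at this ⊢; try omega)

def parse_problems_alt (columns : List String) : List (List String) :=
  pvAltGo columns []

-- ===== PRECONDITION & SPEC =====
def Spec_parse_problems (columns : List String) (out : List (List String)) : Prop := out = parse_problems_alt columns
instance (columns : List String) (out : List (List String)) : Decidable (Spec_parse_problems columns out) := by unfold Spec_parse_problems; infer_instance

-- ===== CLAIM (what is proved, stated in full; the proofs are below) =====
def Claim_equal_parse_problems : Prop := ∀ (columns : List String), Dom_parse_problems columns → Spec_parse_problems columns (parse_problems columns)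

-- ===== LEMMAS AND PROOFS =====

-- reference: the maximal non-blank runs, left to right
def pvGroups : List String → List (List String)
  | [] => []
  | c :: cs =>
    if pvBlank c then pvGroups cs
    else (c :: cs.takeWhile (fun x => !pvBlank x)) :: pvGroups (cs.dropWhile (fun x => !pvBlank x))
termination_by cols => cols.length
decreasing_by
  all_goals (have := List.length_dropWhile_le (fun x => !pvBlank x) cs; simp at this ⊢; try omega)

-- A's loop with a pending partial run, expressed recursively
def pvGw : List String → List String → List (List String)
  | cur, [] => if cur ≠ [] then [cur] else []
  | cur, c :: cs =>
    if pvBlank c then (if cur ≠ [] then cur :: pvGw [] cs else pvGw [] cs)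
    else pvGw (cur ++ [c]) cs

theorem pvAltGo_eq (cols : List String) (acc : List (List String)) :
    pvAltGo cols acc = (pvGroups cols).reverse ++ acc := by
  induction cols, acc using pvAltGo.induct with
  | case1 acc => simp [pvAltGo, pvGroups]
  | case2 c cs acc h ih => simp [pvAltGo, pvGroups, h, ih]
  | case3 c cs acc h ih => simp [pvAltGo, pvGroups, h, ih]

theorem pvFoldA_eq (cols : List String) (probs : List (List String)) (cur : List String) :
    (if (List.foldl pvStepA (probs, cur) cols).2 ≠ [] then
       (List.foldl pvStepA (probs, cur) cols).1 ++ [(List.foldl pvStepA (probs, cur) cols).2]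
     else (List.foldl pvStepA (probs, cur) cols).1) = probs ++ pvGw cur cols := by
  induction cols generalizing probs cur with
  | nil => by_cases h : cur = [] <;> simp [pvGw, h]
  | cons c cs ih =>
    by_cases hb : pvBlank c
    · by_cases h : cur = [] <;> simp [pvStepA, pvGw, hb, h, ih]
    · simp [pvStepA, pvGw, hb, ih]

theorem pvGw_eq (cols : List String) (cur : List String) :
    pvGw cur cols =
      if cur = [] then pvGroups cols
      else (cur ++ cols.takeWhile (fun x => !pvBlank x)) ::
            pvGroups (cols.dropWhile (fun x => !pvBlank x)) := by
  induction cols generalizing cur with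
  | nil => by_cases h : cur = [] <;> simp [pvGw, pvGroups, h]
  | cons c cs ih =>
    by_cases hb : pvBlank c
    · by_cases h : cur = [] <;>
        simp [pvGw, hb, h, ih, pvGroups]
    · rw [show pvGw cur (c :: cs) = pvGw (cur ++ [c]) cs by simp [pvGw, hb]]
      rw [ih]
      by_cases h : cur = [] <;>
        simp [h, pvGroups, hb]

-- ===== VERDICT (by name: the statement is the Claim_ definition above) =====
theorem parse_problems_spec : Claim_equal_parse_problems := by
  intro columns _
  unfold Spec_parse_problems parse_problems parse_problems_alt
  simp only [pvAltGo_eq, pvFoldA_eq, pvGw_eq]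
  simp
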